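-- pv_equiv track=rewrite | github.com/raddanfea/felv | 1st/new_num__.py | get_last_digit
-- ===== SOURCE A (Python) =====
-- def get_last_digit(n):
--     a = 1
--     while True:
--         k = n - a
--         if k % 10 == 0:
--             break
--         a += 1
--     return a
-- ===== SOURCE B (Python) =====
-- def get_last_digit(n):
--     r = n % 10
--     return 10 if r == 0 else r
-- ===== Notes on version B (the rewrite author's own statement) =====
-- stated objective: simpler
-- what changed: Replaces the trial while-loop with a single closed-form modulo: the answer is n % 10, except that a residue of zero maps to ten.
import Mathlib
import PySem

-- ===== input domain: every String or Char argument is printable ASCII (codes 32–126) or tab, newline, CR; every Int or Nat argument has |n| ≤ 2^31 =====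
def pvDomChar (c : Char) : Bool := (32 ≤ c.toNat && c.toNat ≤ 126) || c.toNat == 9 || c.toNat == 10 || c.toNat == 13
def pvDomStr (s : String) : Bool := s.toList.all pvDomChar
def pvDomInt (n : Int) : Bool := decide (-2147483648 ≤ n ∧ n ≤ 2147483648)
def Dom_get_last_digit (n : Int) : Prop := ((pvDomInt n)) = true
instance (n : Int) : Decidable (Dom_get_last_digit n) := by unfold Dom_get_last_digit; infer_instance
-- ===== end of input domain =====

-- B replaces A's trial while-loop by the closed form 'r = n % 10; 10 if r == 0 else r' (simpler).

-- ===== PORT A =====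
-- A's 'while True' loop: try a = 1, 2, … until (n - a) % 10 == 0.  It always
-- succeeds within 10 steps (some a in 1..10 is ≡ n mod 10), so the loop is
-- ported with a fuel of 10 that is provably never exhausted on any Int.
def get_last_digit_loop (n : Int) (a : Int) : Nat → Int
  | 0 => a           -- unreachable: within any 10 consecutive a some n - a is divisible by 10
  | fuel + 1 =>
    if PySem.Int.mod (n - a) 10 = 0 then a
    else get_last_digit_loop n (a + 1) fuel

def get_last_digit (n : Int) : Int := get_last_digit_loop n 1 10

-- ===== PORT B =====
def get_last_digit_alt (n : Int) : Int :=
  let r := PySem.Int.mod n 10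
  if r = 0 then 10 else r

-- ===== PRECONDITION & SPEC =====
def Spec_get_last_digit (n : Int) (out : Int) : Prop := out = get_last_digit_alt n
instance (n : Int) (out : Int) : Decidable (Spec_get_last_digit n out) := by unfold Spec_get_last_digit; infer_instance

-- ===== CLAIM (what is proved, stated in full; the proofs are below) =====
def Claim_equal_get_last_digit : Prop := ∀ (n : Int), Dom_get_last_digit n → Spec_get_last_digit n (get_last_digit n)

-- ===== LEMMAS AND PROOFS =====

-- Invariant of A's trial loop: if t is the unique hit in the remaining window, the loop returns t.
theorem get_last_digit_loop_eq (fuel : Nat) (n a t : Int)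
    (hat : a ≤ t) (hfuel : t < a + fuel)
    (ht : PySem.Int.mod (n - t) 10 = 0)
    (hmin : ∀ b, a ≤ b → b < t → PySem.Int.mod (n - b) 10 ≠ 0) :
    get_last_digit_loop n a fuel = t := by
  induction fuel generalizing a with
  | zero => omega
  | succ f ih =>
    simp only [get_last_digit_loop]
    by_cases h : PySem.Int.mod (n - a) 10 = 0
    · simp only [h, if_true]
      by_contra hne
      exact hmin a le_rfl (lt_of_le_of_ne hat (by exact fun e => hne e)) h
    · simp only [h, if_false]
      exact ih (a + 1) (by rcases lt_or_eq_of_le hat with h' | h'; omega; exact absurd (h' ▸ ht) h)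
        (by omega) (fun b hb hbt => hmin b (by omega) hbt)

-- ===== VERDICT (by name: the statement is the Claim_ definition above) =====
theorem get_last_digit_spec : Claim_equal_get_last_digit := by
  intro n _
  unfold Spec_get_last_digit get_last_digit get_last_digit_alt
  set r := PySem.Int.mod n 10 with hr
  have hr' : r = n % 10 := by simp [hr, PySem.Int.mod, Int.fmod_eq_emod]
  by_cases h0 : r = 0 <;>
    [simp only [h0, if_true]; simp only [if_neg h0]] <;>
    refine get_last_digit_loop_eq 10 n 1 _ ?_ ?_ ?_ ?_ <;>
    · first
      | omega
      | (simp only [PySem.Int.mod, Int.fmod_eq_emod]; omega)
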